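-- pv_equiv track=rewrite | github.com/jongyuni/roadtowork | programmers/월간 코드 챌린지 시즌3/n^2 배열 자르기.py | solution
-- ===== SOURCE A (Python) =====
-- def solution(n, left, right):
--     answer = []
--     s_i, s_j = divmod(left, n)
--     e_i, e_j = divmod(right, n)
--
--     for i in range(s_i, e_i + 1):
--         m = 0
--         if i == s_i:
--             m = s_j
--         if i == e_i:
--             n = e_j + 1
--         for j in range(m, n):
--             answer.append(max(i + 1, j + 1))
--
--     return answer
-- ===== SOURCE B (Python) =====
-- def solution(n, left, right):
--     # single flat pass over the linear index range; element k of the n*n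
--     # grid (row-major) has value max(k // n, k % n) + 1
--     return [max(k // n, k % n) + 1 for k in range(left, right + 1)]
-- ===== Notes on version B (the rewrite author's own statement) =====
-- stated objective: simpler
-- what changed: Replaced the nested row/column loops with their s_i/e_i/s_j/e_j boundary special-casing and the in-loop mutation of n by one flat comprehension over the linear index range, computing each element as max(k // n, k % n) + 1.
-- outside the precondition, e.g. on solution(-2, 12, -6): A returns [4], B returns []; on solution(-1, -1, 13): A returns [], B returns [2, 1, 1, 1, 1, 1, 1, 1, 1, 1, 1, 1, 1, 1, 1]
import Mathlib
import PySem

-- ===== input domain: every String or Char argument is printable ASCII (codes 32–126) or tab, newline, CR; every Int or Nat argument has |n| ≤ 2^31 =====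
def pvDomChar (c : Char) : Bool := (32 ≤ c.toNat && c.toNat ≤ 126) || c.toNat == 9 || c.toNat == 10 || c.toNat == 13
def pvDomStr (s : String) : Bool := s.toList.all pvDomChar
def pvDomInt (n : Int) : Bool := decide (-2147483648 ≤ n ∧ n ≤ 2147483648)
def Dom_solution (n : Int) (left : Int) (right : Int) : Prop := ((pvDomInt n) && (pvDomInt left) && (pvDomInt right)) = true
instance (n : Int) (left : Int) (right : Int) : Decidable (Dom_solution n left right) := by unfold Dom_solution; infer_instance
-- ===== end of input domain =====

-- B replaces A's nested row/column loops (with boundary special-casing and in-loop mutation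
-- of n) by one flat comprehension over the linear index range — simpler, same cost.


-- ===== PORT A =====
-- literal port of A: divmod of the two endpoints, then a row loop whose state is
-- (answer, current n) — A reassigns n on the last row — with an inner append loop.
def solution (n : Int) (left : Int) (right : Int) : List Int :=
  match PySem.Int.divmod? left n, PySem.Int.divmod? right n with
  | some (s_i, s_j), some (e_i, e_j) =>
    ((PySem.List.pyRange s_i (e_i + 1) 1).foldl
      (fun (st : List Int × Int) i =>
        let m : Int := 0
        let m := if i = s_i then s_j else m
        let nn := if i = e_i then e_j + 1 else st.2
        ((PySem.List.pyRange m nn 1).foldl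
          (fun acc j => acc ++ [max (i + 1) (j + 1)]) st.1, nn))
      ([], n)).1
  | _, _ => []  -- unreachable under Pre_solution (n = 0: Python raises ZeroDivisionError)

-- ===== PORT B =====
def solution_alt (n : Int) (left : Int) (right : Int) : List Int :=
  (PySem.List.pyRange left (right + 1) 1).map
    (fun k => max (PySem.Int.floordiv k n) (PySem.Int.mod k n) + 1)

-- ===== PRECONDITION & SPEC =====
-- Pre_ excludes n ≤ 0: for n = 0 A's divmod raises ZeroDivisionError, and negative n is
-- outside the task's natural domain (n is a grid size), where A's returned values are
-- accidents of floor-divmod with a negative divisor.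
def Pre_solution (n : Int) (left : Int) (right : Int) : Prop := 0 < n
instance (n : Int) (left : Int) (right : Int) : Decidable (Pre_solution n left right) := by unfold Pre_solution; infer_instance
def pvWitness_solution : Int × Int × Int := (3, 2, 5)

def Spec_solution (n : Int) (left : Int) (right : Int) (out : List Int) : Prop := out = solution_alt n left right
instance (n : Int) (left : Int) (right : Int) (out : List Int) : Decidable (Spec_solution n left right out) := by unfold Spec_solution; infer_instance

-- ===== CLAIM (what is proved, stated in full; the proofs are below) =====
def Claim_equal_solution : Prop := ∀ (n : Int) (left : Int) (right : Int), Dom_solution n left right → Pre_solution n left right → Spec_solution n left right (solution n left right)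

-- ===== LEMMAS AND PROOFS =====

-- B's per-element function and A's per-element function
def pvF (n k : Int) : Int := max (PySem.Int.floordiv k n) (PySem.Int.mod k n) + 1
def pvG (i j : Int) : Int := max (i + 1) (j + 1)

-- the inner append loop is a map
theorem pv_foldl_append (f : Int → Int) :
    ∀ (l : List Int) (a : List Int),
      l.foldl (fun acc j => acc ++ [f j]) a = a ++ l.map f := by
  intro l
  induction l with
  | nil => intro a; simp
  | cons x xs ih => intro a; simp [List.foldl, ih]

-- factor a prefix of the accumulator out of A's row loop (the body only appends to st.1)
theorem pv_acc_out (g : Int → Int → List Int) (h : Int → Int → Int) :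
    ∀ (l : List Int) (C acc : List Int) (v : Int),
      l.foldl (fun (st : List Int × Int) i => (st.1 ++ g i st.2, h i st.2)) (C ++ acc, v)
      = ((C ++ (l.foldl (fun (st : List Int × Int) i => (st.1 ++ g i st.2, h i st.2)) (acc, v)).1),
         (l.foldl (fun (st : List Int × Int) i => (st.1 ++ g i st.2, h i st.2)) (acc, v)).2) := by
  intro l
  induction l with
  | nil => intro C acc v; simp
  | cons x xs ih =>
    intro C acc v
    simp only [List.foldl]
    rw [List.append_assoc]
    exact ih C (acc ++ g x v) (h x v)

-- one (possibly clipped) row of B's flat map is one row of A's values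
theorem pv_rowF (n i m M : Int) (hn : 0 < n) (hm : 0 ≤ m) (hM : M ≤ n) :
    (PySem.List.pyRange (i * n + m) (i * n + M) 1).map (pvF n)
    = (PySem.List.pyRange m M 1).map (pvG i) := by
  rw [PySem.List.pyRange_one (i * n + m), PySem.List.pyRange_one m]
  have hlen : (i * n + M - (i * n + m)).toNat = (M - m).toNat := by omega
  rw [hlen, List.map_map, List.map_map]
  apply List.map_congr_left
  intro k hk
  have hk' : (k : Int) < M - m := by
    have := List.mem_range.mp hk
    omega
  have hj1 : (0 : Int) ≤ m + k := by positivity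
  have hj2 : m + (k : Int) < n := by omega
  have hdiv : PySem.Int.floordiv (i * n + (m + k)) n = i := by
    rw [PySem.Int.floordiv_eq_iff_of_pos hn]
    constructor <;> nlinarith
  have hmod : PySem.Int.mod (i * n + (m + k)) n = m + k := by
    have := PySem.Int.floordiv_mul_add_mod (i * n + (m + k)) n
    rw [hdiv] at this
    omega
  simp only [Function.comp]
  have harg : i * n + m + (k : Int) = i * n + (m + k) := by ring
  rw [harg]
  simp only [pvF, pvG, hdiv, hmod]
  omega

-- A's loop with the boundary branches as row bounds; induction over the number of rows
theorem pv_main (n : Int) (hn : 0 < n) (e_i e_j : Int) (hej1 : 0 ≤ e_j) (hej2 : e_j < n) :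
    ∀ (d : Nat) (s_i s_j : Int), 0 ≤ s_j → s_j < n → s_i ≤ e_i → (e_i - s_i).toNat = d →
      (PySem.List.pyRange (s_i * n + s_j) (e_i * n + e_j + 1) 1).map (pvF n)
      = ((PySem.List.pyRange s_i (e_i + 1) 1).foldl
          (fun (st : List Int × Int) i =>
            ((st.1 ++ (PySem.List.pyRange (if i = s_i then s_j else 0)
                        (if i = e_i then e_j + 1 else st.2) 1).map (pvG i)),
             (if i = e_i then e_j + 1 else st.2)))
          ([], n)).1 := by
  intro d
  induction d with
  | zero =>
    intro s_i s_j hsj1 hsj2 hle hd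
    have heq : s_i = e_i := by omega
    subst heq
    rw [PySem.List.pyRange_one_singleton]
    simp only [List.foldl, if_true, List.nil_append]
    have h0 : s_i * n + e_j + 1 = s_i * n + (e_j + 1) := by ring
    rw [h0, pv_rowF n s_i s_j (e_j + 1) hn hsj1 (by omega)]
  | succ d ih =>
    intro s_i s_j hsj1 hsj2 hlt hd
    have hlt' : s_i < e_i := by omega
    -- split B's range at the end of the first row
    rw [PySem.List.pyRange_one_append (s_i * n + s_j) ((s_i + 1) * n) (e_i * n + e_j + 1)
      (by nlinarith) (by nlinarith), List.map_append]
    have h1 : (s_i + 1) * n = s_i * n + n := by ring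
    rw [h1, pv_rowF n s_i s_j n hn hsj1 le_rfl]
    have h2 : s_i * n + n = (s_i + 1) * n + 0 := by ring
    rw [h2, ih (s_i + 1) 0 le_rfl hn (by omega) (by omega)]
    -- unroll the first iteration of A's loop
    rw [PySem.List.pyRange_one_cons (by omega : s_i < e_i + 1)]
    simp only [List.foldl, if_true, if_neg (show ¬ s_i = e_i by omega),
      List.nil_append]
    -- remaining iterations never see i = s_i; align the two loop bodies
    rw [PySem.List.foldl_congr_mem _
      (fun (st : List Int × Int) i =>
        ((st.1 ++ (PySem.List.pyRange (if i = s_i then s_j else 0)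
                    (if i = e_i then e_j + 1 else st.2) 1).map (pvG i)),
         (if i = e_i then e_j + 1 else st.2)))
      (fun (st : List Int × Int) i =>
        ((st.1 ++ (PySem.List.pyRange (if i = s_i + 1 then 0 else 0)
                    (if i = e_i then e_j + 1 else st.2) 1).map (pvG i)),
         (if i = e_i then e_j + 1 else st.2)))
      _
      (by
        intro acc i hi
        have hia : s_i + 1 ≤ i := (PySem.List.mem_pyRange_one.mp hi).1
        simp only [if_neg (show ¬ i = s_i by omega), ite_self])]
    have hout := pv_acc_out
      (fun i v => (PySem.List.pyRange (if i = s_i + 1 then 0 else 0)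
                    (if i = e_i then e_j + 1 else v) 1).map (pvG i))
      (fun i v => if i = e_i then e_j + 1 else v)
      (PySem.List.pyRange (s_i + 1) (e_i + 1) 1)
      ((PySem.List.pyRange s_j n 1).map (pvG s_i)) [] n
    simp only [List.append_nil] at hout
    rw [hout]

theorem pv_solution_eq (n left right : Int) (hne : n ≠ 0) :
    solution n left right
    = ((PySem.List.pyRange (PySem.Int.floordiv left n) (PySem.Int.floordiv right n + 1) 1).foldl
        (fun (st : List Int × Int) i =>
          ((PySem.List.pyRange (if i = PySem.Int.floordiv left n then PySem.Int.mod left n else 0)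
              (if i = PySem.Int.floordiv right n then PySem.Int.mod right n + 1 else st.2) 1).foldl
            (fun acc j => acc ++ [max (i + 1) (j + 1)]) st.1,
           (if i = PySem.Int.floordiv right n then PySem.Int.mod right n + 1 else st.2)))
        ([], n)).1 := by
  unfold solution
  rw [show PySem.Int.divmod? left n = some (PySem.Int.floordiv left n, PySem.Int.mod left n) from by
        simp [PySem.Int.divmod?, PySem.Int.floordiv, PySem.Int.mod, hne],
      show PySem.Int.divmod? right n = some (PySem.Int.floordiv right n, PySem.Int.mod right n) from by
        simp [PySem.Int.divmod?, PySem.Int.floordiv, PySem.Int.mod, hne]]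

-- ===== VERDICT (by name: the statement is the Claim_ definition above) =====
theorem solution_spec : Claim_equal_solution := by
  intro n left right _ hn
  unfold Pre_solution at hn
  unfold Spec_solution solution_alt
  rw [pv_solution_eq n left right (by omega)]
  set s_i := PySem.Int.floordiv left n with hsi
  set s_j := PySem.Int.mod left n with hsj
  set e_i := PySem.Int.floordiv right n with hei
  set e_j := PySem.Int.mod right n with hej
  have hL : s_i * n + s_j = left := PySem.Int.floordiv_mul_add_mod left n
  have hR : e_i * n + e_j = right := PySem.Int.floordiv_mul_add_mod right n
  have hsj1 : 0 ≤ s_j := PySem.Int.mod_nonneg left hn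
  have hsj2 : s_j < n := PySem.Int.mod_lt left hn
  have hej1 : 0 ≤ e_j := PySem.Int.mod_nonneg right hn
  have hej2 : e_j < n := PySem.Int.mod_lt right hn
  by_cases hord : s_i ≤ e_i
  · have hmain := pv_main n hn e_i e_j hej1 hej2 (e_i - s_i).toNat s_i s_j hsj1 hsj2 hord rfl
    rw [hL, show e_i * n + e_j + 1 = right + 1 by omega] at hmain
    rw [show (fun k => max (PySem.Int.floordiv k n) (PySem.Int.mod k n) + 1) = pvF n from rfl,
        hmain]
    congr 1
    apply PySem.List.foldl_congr_mem
    intro st i _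
    rw [pv_foldl_append]
    rfl
  · -- e_i < s_i: both ranges are empty, both sides are []
    have h1 : right + 1 ≤ left := by nlinarith [hL, hR]
    rw [PySem.List.pyRange_one_eq_nil h1, PySem.List.pyRange_one_eq_nil (show e_i + 1 ≤ s_i by omega)]
    simp
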